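-- pv_equiv track=rewrite | github.com/onfma/labs-python | tema2/ex12.py | group_by_rhyme
-- ===== SOURCE A (Python) =====
-- def group_by_rhyme(words):
--     rhyme_groups = {}
--
--     for word in words:
--         rhyme = word[-2:]
--         if rhyme in rhyme_groups:
--             rhyme_groups[rhyme].append(word)
--         else:
--             rhyme_groups[rhyme] = [word]
--
--     return list(rhyme_groups.values())
-- ===== SOURCE B (Python) =====
-- def group_by_rhyme(words):
--     keys = list(dict.fromkeys(w[-2:] for w in words))
--     return [[w for w in words if w[-2:] == key] for key in keys]
-- ===== Notes on version B (the rewrite author's own statement) =====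
-- stated objective: alternative
-- what changed: Replaces the incremental dict-of-lists grouping pass with an index-then-rescan structure: first collect the distinct two-character rhyme keys in first-appearance order, then build each group by filtering the original list per key.
import Mathlib
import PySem

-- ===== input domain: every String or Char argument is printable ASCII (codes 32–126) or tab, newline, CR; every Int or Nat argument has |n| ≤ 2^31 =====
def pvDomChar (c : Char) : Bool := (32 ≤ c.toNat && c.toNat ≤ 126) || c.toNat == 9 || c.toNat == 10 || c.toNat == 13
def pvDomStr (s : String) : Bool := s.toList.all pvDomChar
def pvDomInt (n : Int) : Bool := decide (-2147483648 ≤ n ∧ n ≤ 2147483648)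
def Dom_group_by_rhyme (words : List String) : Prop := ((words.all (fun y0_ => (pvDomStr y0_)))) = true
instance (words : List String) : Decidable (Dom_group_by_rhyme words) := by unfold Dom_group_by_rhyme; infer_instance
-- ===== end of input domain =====

-- B replaces A's single incremental dict-of-lists grouping pass with an
-- index-then-rescan decomposition (distinct keys first, then one filter per key);
-- objective: alternative (not faster).

-- ===== PORT A =====
-- word[-2:] as a Python slice
def pvRhyme (w : String) : String := PySem.Str.slice w (some (-2)) none

def group_by_rhyme (words : List String) : List (List String) :=
  -- rhyme_groups = {}; for word in words: rhyme_groups[rhyme] = rhyme_groups.get(rhyme, []) + [word]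
  -- (the if-in/append-else-new branch is exactly Dict.modify with default [])
  (words.foldl (fun d w => d.modify (pvRhyme w) [] (· ++ [w]))
    (PySem.Dict.empty : PySem.Dict String (List String))).values

-- ===== PORT B =====
def group_by_rhyme_alt (words : List String) : List (List String) :=
  -- keys = list(dict.fromkeys(w[-2:] for w in words))
  let keys := PySem.List.dedup (words.map (fun w => pvRhyme w))
  -- [[w for w in words if w[-2:] == key] for key in keys]
  keys.map (fun k => words.filter (fun w => pvRhyme w == k))

-- ===== PRECONDITION & SPEC =====
def Spec_group_by_rhyme (words : List String) (out : List (List String)) : Prop := out = group_by_rhyme_alt words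
instance (words : List String) (out : List (List String)) : Decidable (Spec_group_by_rhyme words out) := by unfold Spec_group_by_rhyme; infer_instance

-- ===== CLAIM (what is proved, stated in full; the proofs are below) =====
def Claim_equal_group_by_rhyme : Prop := ∀ (words : List String), Dom_group_by_rhyme words → Spec_group_by_rhyme words (group_by_rhyme words)

-- ===== LEMMAS AND PROOFS =====

theorem group_by_rhyme_eq (words : List String) :
    group_by_rhyme words = group_by_rhyme_alt words := by
  unfold group_by_rhyme group_by_rhyme_alt
  set d := words.foldl (fun d w => d.modify (pvRhyme w) [] (· ++ [w]))
    (PySem.Dict.empty : PySem.Dict String (List String)) with hd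
  have hnd : d.keys.Nodup := by
    rw [hd]
    exact PySem.Dict.nodup_keys_foldl_modify_key words pvRhyme [] _ _
      PySem.Dict.nodup_keys_empty
  have hkeys : d.keys = PySem.List.dedup (words.map (fun w => pvRhyme w)) := by
    rw [hd, PySem.Dict.keys_foldl_modify_key, PySem.Dict.keys_empty,
      PySem.List.dedup_eq_ofList]
    rfl
  have hget : ∀ k, d.getD k [] = words.filter (fun w => pvRhyme w == k) := by
    intro k
    have hfold : d = (words.map (fun w => (pvRhyme w, w))).foldl
        (fun d p => d.modify p.1 [] (· ++ [p.2])) PySem.Dict.empty := by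
      rw [hd, List.foldl_map]
    rw [hfold, PySem.Dict.getD_foldl_modify_append, PySem.Dict.getD_empty,
      List.nil_append, List.filter_map, List.map_map]
    simp [Function.comp_def]
  rw [PySem.Dict.values_eq_map_keys d hnd [], hkeys]
  exact List.map_congr_left (fun k _ => hget k)

-- ===== VERDICT (by name: the statement is the Claim_ definition above) =====
theorem group_by_rhyme_spec : Claim_equal_group_by_rhyme := by
  intro words _
  unfold Spec_group_by_rhyme
  exact group_by_rhyme_eq words
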